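-- pv_equiv track=rewrite | github.com/MarcBurgh/TIPE-music-gen | musique_naif.py | rempli_matrice
-- ===== SOURCE A (Python) =====
-- def construction_liste_notes(notes_musique):
--     """
--     Creé la liste des notes utilisées dans la musique
--     (uniquement celles qu'on utilisera dans l'impro)
--     """
--     vues = set()
--     uniques = []
--     for note in notes_musique:
--         if note not in vues:
--             uniques.append(note)
--             vues.add(note)
--     return uniques
--
-- def init_matrice_transition(lst_notes):
--     """
--     initialise une matrice carree de taille le nombre de notes utilisées dans la musique.
--     """
--     n=len(lst_notes)
--     mat = []
--     for i in range(0,n):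
--         temp=[0 for j in range(n)]
--         mat.append(temp)
--     return mat
--
-- def numero_associe_note(l,note):
--     """
--     renvoie l'indice d'une note dans le tableau des notes utilisées.
--     """
--     for i in range(len(l)):
--         if note==l[i]:
--             return i
--     return -1
--
-- def rempli_matrice(musique):
--     """
--     prerempli la matrice de transition : pour l'instant, on met simplement dans
--     la case (i,j) le nombre de fois où l'on passe de la note i à la note j
--     """
--     l=construction_liste_notes(musique)
--     m = init_matrice_transition(l)
--     for i in range(len(musique)-1):
--         a=numero_associe_note(l,musique[i])
--         b=numero_associe_note(l,musique[i+1])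
--         m[a][b]+=1
--     return m
-- ===== SOURCE B (Python) =====
-- def rempli_matrice(musique):
--     """Row-wise functional construction: row i lists, for each note y, how many
--     times y follows note l[i]; built by filtering the successors of l[i] out of
--     the consecutive-pair list and counting -- no mutation, no incremental updates."""
--     l = list(dict.fromkeys(musique))
--     pairs = list(zip(musique, musique[1:]))
--     def row(x):
--         succ = [b for a, b in pairs if a == x]
--         return [succ.count(y) for y in l]
--     return [row(x) for x in l]
-- ===== Notes on version B (the rewrite author's own statement) =====
-- stated objective: alternative
-- what changed: B inverts the traversal: instead of A's scan over the music that locates and increments one matrix cell per transition (with linear index searches), B builds each matrix row functionally -- filter the successors of that row's note from the consecutive-pair list, then count each note in it -- with no mutation at all.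
import Mathlib
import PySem

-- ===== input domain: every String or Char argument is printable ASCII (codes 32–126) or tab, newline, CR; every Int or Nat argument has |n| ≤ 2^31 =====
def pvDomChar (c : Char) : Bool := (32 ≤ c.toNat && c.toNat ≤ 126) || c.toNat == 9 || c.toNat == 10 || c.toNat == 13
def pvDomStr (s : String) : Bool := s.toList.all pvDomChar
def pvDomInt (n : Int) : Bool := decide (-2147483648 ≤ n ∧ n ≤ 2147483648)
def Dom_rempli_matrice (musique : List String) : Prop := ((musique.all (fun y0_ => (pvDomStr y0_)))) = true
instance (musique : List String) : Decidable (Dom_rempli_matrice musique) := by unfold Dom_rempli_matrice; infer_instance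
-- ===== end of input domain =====

-- B builds each matrix row functionally (filter the successors of that note from the consecutive-pair list, then count each note), with no mutation, instead of A's scan that locates and increments one cell per transition; proved to return the same matrix.


-- ===== PORT A =====
def construction_liste_notes (notes_musique : List String) : List String :=
  (notes_musique.foldl
    (fun (st : PySem.Set String × List String) note =>
      if PySem.Set.contains st.1 note then st
      else (PySem.Set.add st.1 note, st.2 ++ [note]))
    (PySem.Set.empty, [])).2

def init_matrice_transition (lst_notes : List String) : List (List Int) :=
  (PySem.List.pyRange 0 (lst_notes.length : Int) 1).foldl
    (fun mat _i => mat ++ [(PySem.List.pyRange 0 (lst_notes.length : Int) 1).map (fun _j => (0 : Int))]) []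

-- the scan 'for i in range(len(l)): if note==l[i]: return i' / 'return -1', index carried along
def numeroGo (note : String) : List String → Int → Int
  | [], _ => -1
  | x :: rest, i => if note = x then i else numeroGo note rest (i + 1)

def numero_associe_note (l : List String) (note : String) : Int := numeroGo note l 0

def rempli_matrice (musique : List String) : List (List Int) :=
  let l := construction_liste_notes musique
  let m := init_matrice_transition l
  (PySem.List.pyRange 0 ((musique.length : Int) - 1) 1).foldl
    (fun m i =>
      let a := numero_associe_note l (PySem.List.pyGetD musique i "")
      let b := numero_associe_note l (PySem.List.pyGetD musique (i + 1) "")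
      let row := PySem.List.pyGetD m a []
      PySem.List.pySetD m a (PySem.List.pySetD row b (PySem.List.pyGetD row b 0 + 1)))
    m

-- ===== PORT B =====
-- row(x): succ = [b for a, b in pairs if a == x]; [succ.count(y) for y in l]
def rempli_matrice_alt (musique : List String) : List (List Int) :=
  let l := PySem.List.dedup musique
  let pairs := musique.zip (PySem.List.slice musique (some 1) none)
  l.map (fun x =>
    let succ := (pairs.filter (fun p => p.1 == x)).map (·.2)
    l.map (fun y => (PySem.List.count succ y : Int)))

-- ===== PRECONDITION & SPEC =====
def Spec_rempli_matrice (musique : List String) (out : List (List Int)) : Prop := out = rempli_matrice_alt musique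
instance (musique : List String) (out : List (List Int)) : Decidable (Spec_rempli_matrice musique out) := by unfold Spec_rempli_matrice; infer_instance

-- ===== CLAIM (what is proved, stated in full; the proofs are below) =====
def Claim_equal_rempli_matrice : Prop := ∀ (musique : List String), Dom_rempli_matrice musique → Spec_rempli_matrice musique (rempli_matrice musique)

-- ===== LEMMAS AND PROOFS =====

-- A's dedup loop (set of seen notes + list of uniques) keeps both components equal
lemma construction_go (xs : List String) (s : List String) :
    (xs.foldl
      (fun (st : PySem.Set String × List String) note =>
        if PySem.Set.contains st.1 note then st
        else (PySem.Set.add st.1 note, st.2 ++ [note]))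
      (s, s)) = (xs.foldl PySem.Set.add s, xs.foldl PySem.Set.add s) := by
  induction xs generalizing s with
  | nil => rfl
  | cons x rest ih =>
      simp only [List.foldl_cons]
      by_cases h : PySem.Set.contains s x
      · rw [if_pos h]
        have hadd : PySem.Set.add s x = s := by
          simp only [PySem.Set.add]; rw [if_pos h]
        rw [hadd, ih]
      · rw [if_neg h]
        have hadd : PySem.Set.add s x = s ++ [x] := by
          simp only [PySem.Set.add]; rw [if_neg h]
        rw [hadd, ih]

lemma construction_eq_dedup (xs : List String) :
    construction_liste_notes xs = PySem.List.dedup xs := by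
  unfold construction_liste_notes
  rw [show ((PySem.Set.empty, ([] : List String)) : PySem.Set String × List String)
        = (([] : List String), ([] : List String)) from rfl,
      construction_go]
  rw [PySem.List.dedup_eq_ofList, PySem.Set.ofList_eq_foldl]

-- numero_associe_note on a member is the first-occurrence index
lemma numeroGo_mem (note : String) (l : List String) (h : note ∈ l) (i : Int) :
    numeroGo note l i = i + (List.idxOf note l : Int) := by
  induction l generalizing i with
  | nil => cases h
  | cons x rest ih =>
      by_cases hx : note = x
      · subst hx
        simp [numeroGo, List.idxOf_cons_self]
      · have hm : note ∈ rest := by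
          cases h with
          | head => exact absurd rfl hx
          | tail _ h' => exact h'
        have hbeq : (x == note) = false := by
          simp [Ne.symm hx]
        rw [numeroGo, if_neg hx, ih hm, List.idxOf_cons, hbeq]
        simp only [cond_false]
        push_cast
        ring

lemma numero_eq_idxOf (l : List String) (note : String) (h : note ∈ l) :
    numero_associe_note l note = (List.idxOf note l : Int) := by
  unfold numero_associe_note
  rw [numeroGo_mem note l h 0, zero_add]

-- init_matrice is the all-zero matrix shaped as a double map over l
lemma init_eq_map (l : List String) :
    init_matrice_transition l = l.map (fun _ => l.map (fun _ => (0 : Int))) := by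
  unfold init_matrice_transition
  rw [PySem.List.pyRange_zero_natCast]
  rw [List.foldl_map, PySem.List.foldl_append_singleton_eq_map]
  simp only [List.nil_append]
  rw [List.map_map]
  simp only [Function.comp_def]
  rw [List.map_const', List.map_const', List.length_range, List.map_const', List.map_const']

-- replacing the row at the first index of t in a mapped nodup list
lemma set_map_idx {β : Type} (l : List String) (hnd : l.Nodup) (f : String → β) (v : β)
    (t : String) (ht : t ∈ l) :
    (l.map f).set (List.idxOf t l) v = l.map (fun x => if x = t then v else f x) := by
  have hlt : List.idxOf t l < l.length := List.idxOf_lt_length_of_mem ht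
  apply List.ext_getElem
  · simp
  · intro j hj hj'
    simp only [List.length_map] at hj'
    rw [List.getElem_set]
    by_cases hji : List.idxOf t l = j
    · subst hji
      simp [List.getElem_idxOf hlt]
    · have hne : l[j] ≠ t := by
        intro he
        apply hji
        have h1 : l[List.idxOf t l] = l[j] := by rw [List.getElem_idxOf hlt, he]
        exact (List.Nodup.getElem_inj_iff hnd).mp h1
      simp [hne, hji]

-- single step of A's transition loop, on a matrix in double-map form
lemma step_update (l : List String) (hnd : l.Nodup) (g : String × String → Int)
    (p : String × String) (h1 : p.1 ∈ l) (h2 : p.2 ∈ l) :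
    (let a := numero_associe_note l p.1
     let b := numero_associe_note l p.2
     let row := PySem.List.pyGetD (l.map (fun x => l.map (fun y => g (x, y)))) a []
     PySem.List.pySetD (l.map (fun x => l.map (fun y => g (x, y)))) a
       (PySem.List.pySetD row b (PySem.List.pyGetD row b 0 + 1)))
    = l.map (fun x => l.map (fun y => g (x, y) + if (x, y) = p then 1 else 0)) := by
  have ha := numero_eq_idxOf l p.1 h1
  have hb := numero_eq_idxOf l p.2 h2
  have hlta : List.idxOf p.1 l < l.length := List.idxOf_lt_length_of_mem h1
  have hltb : List.idxOf p.2 l < l.length := List.idxOf_lt_length_of_mem h2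
  simp only [ha, hb, PySem.List.pyGetD_natCast, PySem.List.pySetD_natCast]
  have hrow : (l.map (fun x => l.map (fun y => g (x, y)))).getD (List.idxOf p.1 l) []
      = l.map (fun y => g (p.1, y)) := by
    rw [List.getD_eq_getElem _ _ (by simpa using hlta)]
    simp [List.getElem_idxOf hlta]
  rw [hrow]
  have hcell : (l.map (fun y => g (p.1, y))).getD (List.idxOf p.2 l) 0 = g (p.1, p.2) := by
    rw [List.getD_eq_getElem _ _ (by simpa using hltb)]
    simp [List.getElem_idxOf hltb]
  rw [hcell]
  rw [set_map_idx l hnd _ _ _ h2, set_map_idx l hnd _ _ _ h1]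
  apply List.map_congr_left
  intro x _
  by_cases hxp : x = p.1
  · rw [if_pos hxp]
    apply List.map_congr_left
    intro y _
    by_cases hyp : y = p.2
    · have hp : (x, y) = p := by rw [hxp, hyp]
      rw [if_pos hyp, if_pos hp, hxp, hyp]
    · have hnp : ¬ ((x, y) = p) := by
        intro he; exact hyp (congrArg Prod.snd he)
      rw [if_neg hyp, if_neg hnp, hxp, add_zero]
  · rw [if_neg hxp]
    apply List.map_congr_left
    intro y _
    have hnp : ¬ ((x, y) = p) := by
      intro he; exact hxp (congrArg Prod.fst he)
    rw [if_neg hnp, add_zero]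

-- folding A's transition loop over a list of pairs whose components all lie in l
lemma fold_pairs (l : List String) (hnd : l.Nodup) (ps : List (String × String))
    (hps : ∀ p ∈ ps, p.1 ∈ l ∧ p.2 ∈ l) (g : String × String → Int) :
    ps.foldl
      (fun m p =>
        let a := numero_associe_note l p.1
        let b := numero_associe_note l p.2
        let row := PySem.List.pyGetD m a []
        PySem.List.pySetD m a (PySem.List.pySetD row b (PySem.List.pyGetD row b 0 + 1)))
      (l.map (fun x => l.map (fun y => g (x, y))))
    = l.map (fun x => l.map (fun y => g (x, y) + List.count (x, y) ps)) := by
  induction ps generalizing g with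
  | nil => simp
  | cons p rest ih =>
      rw [List.foldl_cons, step_update l hnd g p (hps p (by simp)).1 (hps p (by simp)).2,
          ih (fun q hq => hps q (by simp [hq])) (fun q => g q + if q = p then 1 else 0)]
      apply List.map_congr_left
      intro x _
      apply List.map_congr_left
      intro y _
      rw [List.count_cons]
      by_cases h : (x, y) = p
      · have hb : (p == (x, y)) = true := by simp [h.symm]
        rw [hb, if_pos rfl, if_pos h]
        push_cast
        ring
      · have hb : (p == (x, y)) = false := by
          simp only [beq_eq_false_iff_ne, ne_eq]
          intro he; exact h he.symm
        rw [hb]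
        simp only [Bool.false_eq_true, if_false, add_zero]
        rw [if_neg h, add_zero]

-- the index loop over range(len(xs)-1) reading xs[i], xs[i+1] is a fold over zip xs xs.tail
lemma range_pairs_nat {β : Type} (g : β → String → String → β) :
    ∀ (rest : List String) (x : String) (init : β),
    (List.range rest.length).foldl
      (fun acc k => g acc (PySem.List.pyGetD (x :: rest) ((k : Nat) : Int) "")
        (PySem.List.pyGetD (x :: rest) (((k : Nat) : Int) + 1) "")) init
    = ((x :: rest).zip rest).foldl (fun acc p => g acc p.1 p.2) init := by
  intro rest
  induction rest with
  | nil => intro x init; rfl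
  | cons y rest' ih =>
      intro x init
      rw [List.length_cons, List.range_succ_eq_map, List.foldl_cons, List.foldl_map]
      have h0 : PySem.List.pyGetD (x :: y :: rest') ((0 : Nat) : Int) "" = x := by
        rw [PySem.List.pyGetD_natCast]; rfl
      have h1 : PySem.List.pyGetD (x :: y :: rest') (((0 : Nat) : Int) + 1) "" = y := by
        rw [show (((0 : Nat) : Int) + 1) = ((1 : Nat) : Int) by omega,
            PySem.List.pyGetD_natCast]
        rfl
      rw [h0, h1]
      have hfun : ∀ (acc : β), ∀ k ∈ List.range rest'.length,
          g acc (PySem.List.pyGetD (x :: y :: rest') ((k.succ : Nat) : Int) "")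
            (PySem.List.pyGetD (x :: y :: rest') (((k.succ : Nat) : Int) + 1) "")
          = g acc (PySem.List.pyGetD (y :: rest') ((k : Nat) : Int) "")
            (PySem.List.pyGetD (y :: rest') (((k : Nat) : Int) + 1) "") := by
        intro acc k _
        have e1 : PySem.List.pyGetD (x :: y :: rest') ((k.succ : Nat) : Int) ""
            = PySem.List.pyGetD (y :: rest') ((k : Nat) : Int) "" := by
          rw [PySem.List.pyGetD_natCast, PySem.List.pyGetD_natCast]
          rfl
        have e2 : PySem.List.pyGetD (x :: y :: rest') (((k.succ : Nat) : Int) + 1) ""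
            = PySem.List.pyGetD (y :: rest') (((k : Nat) : Int) + 1) "" := by
          rw [show (((k.succ : Nat) : Int) + 1) = ((k + 2 : Nat) : Int) by omega,
              show (((k : Nat) : Int) + 1) = ((k + 1 : Nat) : Int) by omega,
              PySem.List.pyGetD_natCast, PySem.List.pyGetD_natCast]
          rfl
        rw [e1, e2]
      rw [PySem.List.foldl_congr_mem _ _ _ _ hfun, ih y (g init x y)]
      rfl

lemma range_pairs {β : Type} (xs : List String) (g : β → String → String → β) (init : β) :
    (PySem.List.pyRange 0 ((xs.length : Int) - 1) 1).foldl
      (fun acc i => g acc (PySem.List.pyGetD xs i "") (PySem.List.pyGetD xs (i + 1) ""))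
      init
    = (xs.zip xs.tail).foldl (fun acc p => g acc p.1 p.2) init := by
  cases xs with
  | nil => rfl
  | cons x rest =>
      have hlen : ((x :: rest).length : Int) - 1 = (rest.length : Int) := by
        simp
      rw [hlen, PySem.List.pyRange_zero_natCast, List.foldl_map]
      exact range_pairs_nat g rest x init

-- pairs of consecutive notes have both components among the (deduplicated) notes
lemma zip_mem_dedup (musique : List String) (p : String × String)
    (hp : p ∈ musique.zip musique.tail) :
    p.1 ∈ PySem.List.dedup musique ∧ p.2 ∈ PySem.List.dedup musique := by
  obtain ⟨a, b⟩ := p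
  have h := List.of_mem_zip hp
  constructor
  · exact (PySem.List.mem_dedup musique a).mpr h.1
  · exact (PySem.List.mem_dedup musique b).mpr (List.mem_of_mem_tail h.2)

-- counting y among the successors of x is counting the pair (x, y)
lemma count_succ (ps : List (String × String)) (x y : String) :
    ((ps.filter (fun p => p.1 == x)).map (·.2)).count y = ps.count (x, y) := by
  rw [List.count_eq_countP, List.countP_map, List.countP_filter,
      List.count_eq_countP]
  apply List.countP_congr
  intro p _
  cases p
  simp [Function.comp, Bool.and_comm, and_comm]

-- B's matrix, evaluated to the pair-count matrix over zip xs xs.tail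
lemma alt_eq_counts (musique : List String) :
    rempli_matrice_alt musique
    = (PySem.List.dedup musique).map (fun x => (PySem.List.dedup musique).map
        (fun y => (List.count (x, y) (musique.zip musique.tail) : Int))) := by
  unfold rempli_matrice_alt
  rw [show PySem.List.slice musique (some 1) none = musique.tail from
        PySem.List.slice_from_one musique]
  simp [PySem.List.count_eq, count_succ]

-- ===== VERDICT (by name: the statement is the Claim_ definition above) =====
theorem rempli_matrice_spec : Claim_equal_rempli_matrice := by
  intro musique _
  unfold Spec_rempli_matrice
  rw [show rempli_matrice musique
        = (PySem.List.pyRange 0 ((musique.length : Int) - 1) 1).foldl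
            (fun m i =>
              let a := numero_associe_note (construction_liste_notes musique)
                (PySem.List.pyGetD musique i "")
              let b := numero_associe_note (construction_liste_notes musique)
                (PySem.List.pyGetD musique (i + 1) "")
              let row := PySem.List.pyGetD m a []
              PySem.List.pySetD m a (PySem.List.pySetD row b (PySem.List.pyGetD row b 0 + 1)))
            (init_matrice_transition (construction_liste_notes musique)) from rfl]
  rw [construction_eq_dedup, init_eq_map, alt_eq_counts]
  rw [range_pairs musique
    (fun m u v =>
      let a := numero_associe_note (PySem.List.dedup musique) u
      let b := numero_associe_note (PySem.List.dedup musique) v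
      let row := PySem.List.pyGetD m a []
      PySem.List.pySetD m a (PySem.List.pySetD row b (PySem.List.pyGetD row b 0 + 1)))]
  rw [fold_pairs (PySem.List.dedup musique) (PySem.List.nodup_dedup musique)
    (musique.zip musique.tail) (zip_mem_dedup musique) (fun _ => 0)]
  simp
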